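-- pv_equiv track=rewrite | github.com/qiskit-community/qiskit-aqua | ressources_hybrid/nege.py | maxminus
-- ===== SOURCE A (Python) =====
-- def maxminus(x):
--     ret = ""
--     flag = False
--     for e in reversed(x):
--         if e == "0":
--             if flag:
--                 ret = "1"+ret
--                 flag = True
--             else:
--                 ret = "0"+ret
--                 flag = False
--         else:
--             if flag:
--                 ret = "0"+ret
--                 flag = True
--             else:
--                 ret = "1"+ret
--                 flag = True
--     return ret
-- ===== SOURCE B (Python) =====
-- def maxminus(x):
--     # two's-complement negation of a bit string: find rightmost non-'0'
--     # (the pivot), flip everything left of it, put '1' at the pivot,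
--     # keep the trailing zeros; all-zero/empty input maps to itself.
--     r = x[::-1]
--     z = 0
--     while z < len(r) and r[z] == "0":
--         z += 1
--     if z == len(r):
--         return "0" * len(x)
--     prefix = x[: len(x) - z - 1]
--     return "".join("1" if c == "0" else "0" for c in prefix) + "1" + "0" * z
-- ===== Notes on version B (the rewrite author's own statement) =====
-- stated objective: faster
-- what changed: B replaces A's stateful right-to-left flag scan with per-character string prepends by a pivot decomposition: locate the rightmost non-zero character, then assemble flipped-prefix + pivot bit + trailing zeros in one join (all-zero/empty input yields a zero string of the same length).
import Mathlib
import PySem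

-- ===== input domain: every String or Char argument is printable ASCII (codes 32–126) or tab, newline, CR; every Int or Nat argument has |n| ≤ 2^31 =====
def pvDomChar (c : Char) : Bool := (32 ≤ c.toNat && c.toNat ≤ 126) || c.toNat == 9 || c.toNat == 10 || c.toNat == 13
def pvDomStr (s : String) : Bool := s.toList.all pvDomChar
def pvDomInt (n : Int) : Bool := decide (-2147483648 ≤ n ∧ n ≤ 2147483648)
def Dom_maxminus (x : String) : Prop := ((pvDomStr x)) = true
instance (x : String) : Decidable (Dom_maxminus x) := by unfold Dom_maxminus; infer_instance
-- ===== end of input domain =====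

-- B replaces A's stateful right-to-left flag scan with a pivot decomposition:
-- rightmost non-'0' is located, the result is flipped-prefix ++ '1' ++ trailing zeros.

-- ===== PORT A =====
-- state: (ret as list of chars built by prepending, flag)
def maxminusStep (st : List Char × Bool) (e : Char) : List Char × Bool :=
  if e = '0' then
    (if st.2 then ('1' :: st.1, true) else ('0' :: st.1, false))
  else
    (if st.2 then ('0' :: st.1, true) else ('1' :: st.1, true))

def maxminus (x : String) : String :=
  String.mk ((x.toList.reverse.foldl maxminusStep ([], false)).1)

-- ===== PORT B =====
def maxminusFlip (c : Char) : Char := if c = '0' then '1' else '0'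

def maxminus_alt (x : String) : String :=
  let r := x.toList.reverse
  let zs := r.takeWhile (· = '0')      -- trailing zeros of x
  match r.dropWhile (· = '0') with
  | [] => String.mk (List.replicate x.toList.length '0')
  | _ :: tl =>
      String.mk (tl.reverse.map maxminusFlip ++ '1' :: List.replicate zs.length '0')

-- ===== PRECONDITION & SPEC =====
def Spec_maxminus (x : String) (out : String) : Prop := out = maxminus_alt x
instance (x : String) (out : String) : Decidable (Spec_maxminus x out) := by unfold Spec_maxminus; infer_instance

-- ===== CLAIM (what is proved, stated in full; the proofs are below) =====
def Claim_equal_maxminus : Prop := ∀ (x : String), Dom_maxminus x → Spec_maxminus x (maxminus x)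

-- ===== LEMMAS AND PROOFS =====

-- once the flag is set, every further char is flipped and prepended
theorem maxminus_foldl_true (r : List Char) : ∀ (acc : List Char),
    r.foldl maxminusStep (acc, true) = ((r.map maxminusFlip).reverse ++ acc, true) := by
  induction r with
  | nil => intro acc; simp
  | cons c t ih =>
      intro acc
      by_cases hc : c = '0' <;>
        simp [maxminusStep, maxminusFlip, hc, ih]

-- before the flag is set: zeros are copied; the first non-'0' becomes '1' and sets the flag
theorem maxminus_foldl_false (r : List Char) : ∀ (acc : List Char),
    r.foldl maxminusStep (acc, false) =
      ((match r.dropWhile (· = '0') with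
        | [] => []
        | _ :: tl => (tl.map maxminusFlip).reverse ++ ['1']) ++
         (r.takeWhile (· = '0')).reverse ++ acc,
       !(r.dropWhile (· = '0')).isEmpty) := by
  induction r with
  | nil => intro acc; simp
  | cons c t ih =>
      intro acc
      by_cases hc : c = '0'
      · simp only [List.foldl_cons, maxminusStep, hc]
        simp only [List.dropWhile_cons, List.takeWhile_cons, decide_true, if_true]
        simp only [Bool.false_eq_true, if_false]
        rw [ih ('0' :: acc)]
        cases h : t.dropWhile (· = '0') <;> simp
      · simp only [List.foldl_cons, maxminusStep, hc]
        simp only [List.dropWhile_cons, List.takeWhile_cons, hc, decide_false, if_false]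
        simp only [Bool.false_eq_true, if_false]
        rw [maxminus_foldl_true]
        simp

theorem all_zero_replicate (l : List Char) (h : ∀ c ∈ l, c = '0') :
    l = List.replicate l.length '0' := by
  induction l with
  | nil => rfl
  | cons c t ih =>
      rw [List.length_cons, List.replicate_succ, h c (by simp),
        ← ih (fun d hd => h d (by simp [hd]))]

-- ===== VERDICT (by name: the statement is the Claim_ definition above) =====
theorem maxminus_spec : Claim_equal_maxminus := by
  intro x _
  unfold Spec_maxminus maxminus maxminus_alt
  rw [maxminus_foldl_false]
  set r := x.toList.reverse with hr
  cases h : r.dropWhile (· = '0') with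
  | nil =>
      -- all characters of r are '0'
      have htk : r.takeWhile (· = '0') = r := by
        have := List.takeWhile_append_dropWhile (p := (· = '0')) (l := r)
        rw [h, List.append_nil] at this; exact this
      have hall : ∀ c ∈ r, c = '0' := by
        intro c hc
        have : c ∈ r.takeWhile (· = '0') := by rw [htk]; exact hc
        have := List.mem_takeWhile_imp this
        simpa using this
      have hrep : r.reverse = List.replicate x.toList.length '0' := by
        rw [all_zero_replicate r hall]
        simp [List.reverse_replicate, hr]
      rw [htk, hrep]
      simp [String.length_toList, h]
  | cons c tl =>
      -- the takeWhile part is all zeros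
      have hz : (r.takeWhile (· = '0')).reverse
          = List.replicate (r.takeWhile (· = '0')).length '0' := by
        rw [all_zero_replicate (r.takeWhile (· = '0'))
              (fun d hd => by simpa using List.mem_takeWhile_imp hd)]
        simp [List.reverse_replicate]
      simp [h, hz, List.map_reverse]
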